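-- pv_equiv track=rewrite | github.com/chrisbouchard/braillegraph | braillegraph.py | braillegraph
-- ===== SOURCE A (Python) =====
-- import itertools
--
-- _BRAILLE_EMPTY_BLOCK = 0x2800
--
-- _BRAILLE_HALF_ROW = [0x01, 0x02, 0x04, 0x40]
--
-- _BRAILLE_FULL_ROW = [0x09, 0x12, 0x24, 0xC0]
--
-- def chunk(iterable, size):
--     '''Split an iterable into chunks of a fixed size.'''
--     yield from (
--         (item for index, item in group)
--         for key, group in itertools.groupby(
--             enumerate(iterable),
--             lambda item: item[0] // size
--         )
--     )
--
-- def braillegraph(bars):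
--     '''Doc string'''
--     lines = []
--
--     # Each line can accomodate our bars, one for each row in the braille
--     # block.
--     for bar_group in chunk(bars, 4):
--         line = []
--
--         for braille_row, bar_value in enumerate(bar_group):
--             # The number of braille blocks needed to draw this bar
--             blocks_needed = (bar_value // 2) + (bar_value % 2)
--
--             # The number of braille blocks we'll need to append to the current
--             # line to accomodate this bar
--             extra_blocks_needed = blocks_needed - len(line)
--
--             # If we need extra blocks, add them.
--             if extra_blocks_needed > 0:
--                 line.extend([_BRAILLE_EMPTY_BLOCK] * extra_blocks_needed)
--
--             # Fill in the majority of the bar with full braille rows (two dots).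
--             for block_index in range(bar_value // 2):
--                 line[block_index] += _BRAILLE_FULL_ROW[braille_row]
--
--             # If the bar's value is odd, we'll need to add a single dot at the
--             # end.
--             if bar_value % 2:
--                 block_index = (bar_value // 2)
--                 line[block_index] += _BRAILLE_HALF_ROW[braille_row]
--
--         # Wrap up this line by converting all the code points to characters
--         # and concatenating them.
--         lines.append(line)
--
--     # Join all the lines
--     return '\n'.join(''.join(chr(code) for code in line) for line in lines)
-- ===== SOURCE B (Python) =====
-- _BRAILLE_EMPTY_BLOCK = 0x2800
--
-- _BRAILLE_HALF_ROW = [0x01, 0x02, 0x04, 0x40]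
--
-- _BRAILLE_FULL_ROW = [0x09, 0x12, 0x24, 0xC0]
--
--
-- def braillegraph(bars):
--     '''Doc string'''
--     lines = []
--
--     for start in range(0, len(bars), 4):
--         group = bars[start:start + 4]
--
--         # Width of this line: the largest number of blocks any bar needs.
--         width = max((v // 2 + v % 2 for v in group), default=0)
--
--         # Build the line column-major: one character per block index.
--         lines.append(''.join(
--             chr(_BRAILLE_EMPTY_BLOCK + sum(
--                 _BRAILLE_FULL_ROW[row] if b < v // 2
--                 else _BRAILLE_HALF_ROW[row] if v % 2 and b == v // 2
--                 else 0
--                 for row, v in enumerate(group)))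
--             for b in range(width)))
--
--     return '\n'.join(lines)
-- ===== Notes on version B (the rewrite author's own statement) =====
-- stated objective: simpler
-- what changed: B builds each line column-major: it slices the bars into groups of four, computes the line width as the max blocks needed, and emits each braille character directly as 0x2800 plus the sum of the four rows' contributions at that block, instead of A's groupby-based chunking and row-by-row in-place mutation (extend + indexed +=) of a growing code-point list.
-- outside the precondition, e.g. on braillegraph([2, -1]): A returns '⠋', B returns '⠉'; on braillegraph([-2]): A returns '', B returns ''
import Mathlib
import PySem

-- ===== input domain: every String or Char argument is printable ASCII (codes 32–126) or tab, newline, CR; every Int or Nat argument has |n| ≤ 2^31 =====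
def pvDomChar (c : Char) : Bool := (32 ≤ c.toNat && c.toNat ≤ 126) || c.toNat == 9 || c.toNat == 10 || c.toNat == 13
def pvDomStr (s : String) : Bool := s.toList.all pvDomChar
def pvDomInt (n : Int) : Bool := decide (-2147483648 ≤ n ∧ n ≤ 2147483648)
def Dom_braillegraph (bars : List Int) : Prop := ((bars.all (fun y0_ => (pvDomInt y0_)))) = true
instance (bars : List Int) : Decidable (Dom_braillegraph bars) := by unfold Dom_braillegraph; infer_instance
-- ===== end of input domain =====

-- B renders each braille line column-major (slice groups of 4, width = max blocks, one character
-- per block as 0x2800 + row sums) instead of A's groupby chunking and in-place list mutation: simpler.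


-- ===== PORT A =====
def pvFullRow : List Int := [0x09, 0x12, 0x24, 0xC0]   -- _BRAILLE_FULL_ROW
def pvHalfRow : List Int := [0x01, 0x02, 0x04, 0x40]   -- _BRAILLE_HALF_ROW

-- itertools.groupby, keys only consecutive: groups maximal runs of equal key (values kept)
def pvGroupby {α : Type} (key : α → Int) : List α → List (List α)
  | [] => []
  | x :: xs =>
    match pvGroupby key xs with
    | [] => [[x]]
    | [] :: gs => [x] :: gs   -- never produced
    | (y :: g) :: gs => if key x = key y then (x :: y :: g) :: gs else [x] :: (y :: g) :: gs

-- chunk(iterable, size): groupby(enumerate(iterable), index // size), inner items stripped of the index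
def pvChunk (bars : List Int) (size : Int) : List (List Int) :=
  (pvGroupby (fun p => PySem.Int.floordiv p.1 size) (PySem.List.enumerate bars)).map
    (fun g => g.map Prod.snd)

-- line[i] += x  (Python indexing; out-of-range = IndexError is excluded by Pre_, where pyGetD/pySetD default)
def pvAddAt (line : List Int) (i : Int) (x : Int) : List Int :=
  PySem.List.pySetD line i (PySem.List.pyGetD line i 0 + x)

-- body of A's 'for braille_row, bar_value in enumerate(bar_group)' loop
def pvBarStep (line : List Int) (row : Int) (v : Int) : List Int :=
  let blocks := PySem.Int.floordiv v 2 + PySem.Int.mod v 2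
  let extra := blocks - PySem.List.len line
  let line := if extra > 0 then line ++ List.replicate extra.toNat 0x2800 else line
  let line := (PySem.List.pyRange 0 (PySem.Int.floordiv v 2) 1).foldl
      (fun ln bi => pvAddAt ln bi (PySem.List.pyGetD pvFullRow row 0)) line
  if PySem.Int.mod v 2 ≠ 0 then pvAddAt line (PySem.Int.floordiv v 2) (PySem.List.pyGetD pvHalfRow row 0)
  else line

def braillegraph (bars : List Int) : String :=
  let lines := (pvChunk bars 4).foldl
    (fun lines group =>
      lines ++ [(PySem.List.enumerate group).foldl (fun line rv => pvBarStep line rv.1 rv.2) []])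
    []
  -- chr(code) is exact for 0 ≤ code < 0x110000 (all codes reached under Pre_ lie in 0x2800..0x28FF)
  PySem.Str.join "\n"
    (lines.map (fun line => PySem.Str.join "" (line.map (fun code => (Char.ofNat code.toNat).toString))))

-- ===== PORT B =====
def braillegraph_alt (bars : List Int) : String :=
  PySem.Str.join "\n"
    ((PySem.List.pyRange 0 (PySem.List.len bars) 4).map (fun start =>
      let group := PySem.List.slice bars (some start) (some (start + 4))
      let width := PySem.List.maxD
        (group.map (fun v => PySem.Int.floordiv v 2 + PySem.Int.mod v 2)) (fun x => x) 0
      PySem.Str.join ""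
        ((PySem.List.pyRange 0 width 1).map (fun b =>
          (Char.ofNat (0x2800 +
            (PySem.List.enumerate group).foldl (fun s rv =>
              s + (if b < PySem.Int.floordiv rv.2 2 then PySem.List.pyGetD pvFullRow rv.1 0
                   else if PySem.Int.mod rv.2 2 ≠ 0 ∧ b = PySem.Int.floordiv rv.2 2 then
                     PySem.List.pyGetD pvHalfRow rv.1 0
                   else 0)) 0).toNat).toString))))

-- ===== PRECONDITION & SPEC =====
-- Pre_ restricts to the natural domain of a bar graph: nonnegative bar heights. On lists with a
-- negative bar value A's behaviour is accidental: an odd negative bar makes A raise IndexError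
-- (negative index on a too-short line) or corrupt an earlier block via negative-index wraparound,
-- while even negative bars are silently skipped (there A happens to agree with B, which also
-- draws nothing for them).
def Pre_braillegraph (bars : List Int) : Prop := ∀ v ∈ bars, 0 ≤ v
instance (bars : List Int) : Decidable (Pre_braillegraph bars) := by unfold Pre_braillegraph; infer_instance
def pvWitness_braillegraph : List Int := [5, 3, 0, 7, 1]

def Spec_braillegraph (bars : List Int) (out : String) : Prop := out = braillegraph_alt bars
instance (bars : List Int) (out : String) : Decidable (Spec_braillegraph bars out) := by unfold Spec_braillegraph; infer_instance

-- ===== CLAIM (what is proved, stated in full; the proofs are below) =====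
def Claim_equal_braillegraph : Prop := ∀ (bars : List Int), Dom_braillegraph bars → Pre_braillegraph bars → Spec_braillegraph bars (braillegraph bars)

-- ===== LEMMAS AND PROOFS =====

-- blocks needed for a bar (Nat view; bars are nonnegative under Pre_)
def pvBlk (v : Int) : Nat := (v.toNat + 1) / 2

-- contribution of bar v at braille row 'row' to block index b (the summand of B's column sums)
def pvCtb (v row : Int) (b : Nat) : Int :=
  if b < v.toNat / 2 then PySem.List.pyGetD pvFullRow row 0
  else if v.toNat % 2 = 1 ∧ b = v.toNat / 2 then PySem.List.pyGetD pvHalfRow row 0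
  else 0

-- total contribution of the bars g (rows r, r+1, ...) at block b
def pvS : List Int → Int → Nat → Int
  | [], _, _ => 0
  | v :: t, r, b => pvCtb v r b + pvS t (r + 1) b

-- running width: max of m and the blocks needed by each bar
def pvW : List Int → Nat → Nat
  | [], m => m
  | v :: t, m => pvW t (max m (pvBlk v))

-- groups of ≤ 4 consecutive elements, the first of size r (1 ≤ r ≤ 4 in use)
def pvChunksFrom {α : Type} (r : Nat) : List α → List (List α)
  | [] => []
  | x :: xs => (x :: xs.take (r - 1)) :: pvChunksFrom 4 (xs.drop (r - 1))
termination_by l => l.length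
decreasing_by simp

theorem pvCtb_zero (v row : Int) (b : Nat) (h : pvBlk v ≤ b) : pvCtb v row b = 0 := by
  unfold pvCtb; unfold pvBlk at h
  rw [if_neg (by omega), if_neg (by rintro ⟨h1, h2⟩; omega)]

theorem pvW_ge (g : List Int) (m : Nat) : m ≤ pvW g m := by
  induction g generalizing m with
  | nil => simp [pvW]
  | cons v t ih => exact le_trans (le_max_left m (pvBlk v)) (ih _)

theorem pvW_cons (v : Int) (t : List Int) (m : Nat) : pvW (v :: t) m = pvW t (max m (pvBlk v)) := rfl

theorem pvAddAt_set (L : List Int) (k : Nat) (x : Int) :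
    pvAddAt L (k : Int) x = L.set k (L.getD k 0 + x) := by
  simp [pvAddAt]

theorem pvAddLoop (k : Nat) (L : List Int) (F : Int) (h : k ≤ L.length) :
    (PySem.List.pyRange 0 (k : Int) 1).foldl (fun ln bi => pvAddAt ln bi F) L
    = L.mapIdx (fun b x => if b < k then x + F else x) := by
  induction k generalizing L with
  | zero =>
    rw [PySem.List.pyRange_one_eq_nil (by omega)]
    apply List.ext_getElem?
    intro i
    simp [List.getElem?_mapIdx]
  | succ k ih =>
    rw [show ((k + 1 : Nat) : Int) = (k : Int) + 1 by push_cast; ring]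
    rw [PySem.List.pyRange_one_succ_right (by positivity)]
    rw [List.foldl_append, ih L (by omega)]
    simp only [List.foldl_cons, List.foldl_nil]
    rw [pvAddAt_set]
    have hk : k < L.length := by omega
    apply List.ext_getElem?
    intro i
    by_cases hik : k = i
    · subst hik
      simp only [List.getElem?_set, List.length_mapIdx]
      rw [if_pos hk]
      rw [List.getD_eq_getElem?_getD, List.getElem?_mapIdx, List.getElem?_eq_getElem hk]
      simp
    · simp only [List.getElem?_set, if_neg hik, List.getElem?_mapIdx]
      rcases Nat.lt_or_ge i L.length with hi | hi
      · rw [List.getElem?_eq_getElem hi]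
        simp only [Option.map_some]
        congr 1
        by_cases hlt : i < k
        · rw [if_pos hlt, if_pos (by omega)]
        · rw [if_neg hlt, if_neg (by omega)]
      · rw [List.getElem?_eq_none (by omega)]
        simp

theorem pvBarStep_char (L : List Int) (row v : Int) (hv : 0 ≤ v) :
    pvBarStep L row v
    = (L ++ List.replicate (pvBlk v - L.length) 0x2800).mapIdx (fun b x => x + pvCtb v row b) := by
  obtain ⟨n, rfl⟩ := Int.eq_ofNat_of_zero_le hv
  have hfd : PySem.Int.floordiv (n : Int) 2 = ((n / 2 : Nat) : Int) := by
    exact_mod_cast PySem.Int.floordiv_natCast n 2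
  have hmd : PySem.Int.mod (n : Int) 2 = ((n % 2 : Nat) : Int) := by
    exact_mod_cast PySem.Int.mod_natCast n 2
  simp only [pvBarStep, hfd, hmd, PySem.List.len_eq]
  have hpad : (if ((n / 2 : Nat) : Int) + ((n % 2 : Nat) : Int) - (L.length : Int) > 0
      then L ++ List.replicate ((((n / 2 : Nat) : Int) + ((n % 2 : Nat) : Int) - (L.length : Int)).toNat) (0x2800 : Int)
      else L) = L ++ List.replicate (pvBlk (n : Int) - L.length) (0x2800 : Int) := by
    unfold pvBlk
    split_ifs with hc
    · congr 2
      omega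
    · simp
      omega
  rw [hpad]
  set P := L ++ List.replicate (pvBlk (n : Int) - L.length) (0x2800 : Int) with hPdef
  have hPlen : P.length = max L.length (pvBlk (n : Int)) := by
    rw [hPdef, List.length_append, List.length_replicate]
    omega
  rw [pvAddLoop (n / 2) P _ (by rw [hPlen]; unfold pvBlk; omega)]
  by_cases hodd : n % 2 = 1
  · rw [if_pos (by omega : ¬ ((n % 2 : Nat) : Int) = 0)]
    have hn2 : n / 2 < P.length := by rw [hPlen]; unfold pvBlk; omega
    rw [pvAddAt_set]
    apply List.ext_getElem?
    intro i
    simp only [List.getElem?_set, List.length_mapIdx, List.getElem?_mapIdx]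
    by_cases hik : n / 2 = i
    · subst hik
      rw [if_pos rfl, if_pos hn2]
      rw [List.getD_eq_getElem?_getD, List.getElem?_mapIdx, List.getElem?_eq_getElem hn2]
      simp only [Option.map_some, Option.getD_some]
      rw [if_neg (by omega)]
      have : pvCtb (n : Int) row (n / 2) = PySem.List.pyGetD pvHalfRow row 0 := by
        unfold pvCtb
        rw [if_neg (by omega), if_pos ⟨by omega, rfl⟩]
      rw [this]
    · rw [if_neg hik]
      rcases Nat.lt_or_ge i P.length with hi | hi
      · rw [List.getElem?_eq_getElem hi]
        simp only [Option.map_some, Option.some_inj]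
        by_cases hlt : i < n / 2
        · rw [if_pos hlt]
          unfold pvCtb
          rw [if_pos (by omega)]
        · rw [if_neg hlt]
          unfold pvCtb
          rw [if_neg (by omega), if_neg (by rintro ⟨h1, h2⟩; omega)]
          ring
      · rw [List.getElem?_eq_none (by omega)]
        simp
  · rw [if_neg (by omega : ¬ ¬ ((n % 2 : Nat) : Int) = 0)]
    apply List.ext_getElem?
    intro i
    simp only [List.getElem?_mapIdx]
    rcases Nat.lt_or_ge i P.length with hi | hi
    · rw [List.getElem?_eq_getElem hi]
      simp only [Option.map_some, Option.some_inj]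
      by_cases hlt : i < n / 2
      · rw [if_pos hlt]
        unfold pvCtb
        rw [if_pos (by omega)]
      · rw [if_neg hlt]
        unfold pvCtb
        rw [if_neg (by omega), if_neg (by rintro ⟨h1, h2⟩; omega)]
        ring
    · rw [List.getElem?_eq_none (by omega)]
      simp

theorem pvRun_char (g : List Int) (r : Int) (L : List Int) (hg : ∀ v ∈ g, 0 ≤ v) :
    (PySem.List.enumerate g r).foldl (fun line rv => pvBarStep line rv.1 rv.2) L
    = (L ++ List.replicate (pvW g L.length - L.length) 0x2800).mapIdx (fun b x => x + pvS g r b) := by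
  induction g generalizing r L with
  | nil =>
    simp only [PySem.List.enumerate_nil, List.foldl_nil, pvW, pvS, Nat.sub_self,
      List.replicate_zero, List.append_nil]
    apply List.ext_getElem?
    intro i
    simp [List.getElem?_mapIdx]
  | cons v t ih =>
    rw [PySem.List.enumerate_cons, List.foldl_cons]
    rw [pvBarStep_char L r v (hg v (by simp))]
    rw [ih (r + 1) _ (fun w hw => hg w (by simp [hw]))]
    simp only [List.length_mapIdx, List.length_append, List.length_replicate]
    rw [show L.length + (pvBlk v - L.length) = max L.length (pvBlk v) by omega]
    rw [pvW_cons]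
    have hMW : max L.length (pvBlk v) ≤ pvW t (max L.length (pvBlk v)) := pvW_ge t _
    apply List.ext_getElem?
    intro i
    simp only [List.getElem?_mapIdx, List.getElem?_append, List.getElem?_replicate,
      List.length_mapIdx, List.length_append, List.length_replicate, pvS]
    by_cases h1 : i < L.length
    · rw [if_pos (by omega : i < L.length + (pvBlk v - L.length)), if_pos h1, if_pos h1]
      cases hx : L[i]? <;> simp only [Option.map_some, Option.map_none]
      rw [Option.some_inj]
      ring
    · rw [if_neg h1, if_neg h1]
      by_cases h2 : i < max L.length (pvBlk v)
      · rw [if_pos (by omega : i < L.length + (pvBlk v - L.length)),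
          if_pos (by omega : i - L.length < pvBlk v - L.length),
          if_pos (by omega : i - L.length < pvW t (max L.length (pvBlk v)) - L.length)]
        simp only [Option.map_some, Option.some_inj]
        ring
      · rw [if_neg (by omega : ¬ i < L.length + (pvBlk v - L.length))]
        by_cases h3 : i < pvW t (max L.length (pvBlk v))
        · rw [if_pos (by omega : i - (L.length + (pvBlk v - L.length)) < pvW t (max L.length (pvBlk v)) - max L.length (pvBlk v)),
            if_pos (by omega : i - L.length < pvW t (max L.length (pvBlk v)) - L.length)]
          simp only [Option.map_some, Option.some_inj]
          rw [pvCtb_zero v r i (by omega)]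
          ring
        · rw [if_neg (by omega : ¬ i - (L.length + (pvBlk v - L.length)) < pvW t (max L.length (pvBlk v)) - max L.length (pvBlk v)),
            if_neg (by omega : ¬ i - L.length < pvW t (max L.length (pvBlk v)) - L.length)]
          simp

theorem pvLineA (g : List Int) (hg : ∀ v ∈ g, 0 ≤ v) :
    (PySem.List.enumerate g).foldl (fun line rv => pvBarStep line rv.1 rv.2) []
    = (List.range (pvW g 0)).map (fun b => 0x2800 + pvS g 0 b) := by
  rw [pvRun_char g 0 [] hg]
  apply List.ext_getElem?
  intro i
  simp only [List.getElem?_mapIdx, List.nil_append, List.length_nil, Nat.sub_zero,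
    List.getElem?_replicate, List.getElem?_map]
  by_cases h : i < pvW g 0
  · rw [if_pos h, List.getElem?_range h]
    simp only [Option.map_some]
  · rw [if_neg h]
    rw [List.getElem?_eq_none (by simpa using by omega : (List.range (pvW g 0)).length ≤ i)]
    simp

theorem pvBlkInt (v : Int) (hv : 0 ≤ v) :
    PySem.Int.floordiv v 2 + PySem.Int.mod v 2 = (pvBlk v : Int) := by
  obtain ⟨n, rfl⟩ := Int.eq_ofNat_of_zero_le hv
  have hfd : PySem.Int.floordiv (n : Int) 2 = ((n / 2 : Nat) : Int) := by
    exact_mod_cast PySem.Int.floordiv_natCast n 2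
  have hmd : PySem.Int.mod (n : Int) 2 = ((n % 2 : Nat) : Int) := by
    exact_mod_cast PySem.Int.mod_natCast n 2
  rw [hfd, hmd]
  unfold pvBlk
  omega

theorem pvCastFoldMax (ns : List Nat) (m : Nat) :
    (ns.map (Nat.cast : Nat → Int)).foldl max (m : Int) = ((ns.foldl max m : Nat) : Int) := by
  induction ns generalizing m with
  | nil => rfl
  | cons n t ih =>
    rw [List.map_cons, List.foldl_cons, List.foldl_cons, ← Nat.cast_max, ih]

theorem pvW_foldl (g : List Int) (m : Nat) : pvW g m = (g.map pvBlk).foldl max m := by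
  induction g generalizing m with
  | nil => rfl
  | cons v t ih => simp only [pvW, List.map_cons, List.foldl_cons, ih]

theorem pvWidthB (g : List Int) (hg : ∀ v ∈ g, 0 ≤ v) :
    PySem.List.maxD (g.map (fun v => PySem.Int.floordiv v 2 + PySem.Int.mod v 2)) (fun x => x) 0
    = (pvW g 0 : Int) := by
  rw [List.map_congr_left (fun v hv => pvBlkInt v (hg v hv))]
  cases g with
  | nil => rfl
  | cons v t =>
    simp only [List.map_cons]
    unfold PySem.List.maxD
    rw [PySem.List.max?_id_cons]
    simp only [Option.getD_some]
    rw [show (t.map fun v => (pvBlk v : Int)) = (t.map pvBlk).map (Nat.cast : Nat → Int) by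
      rw [List.map_map]; rfl]
    rw [pvCastFoldMax]
    rw [pvW_foldl]
    simp [List.foldl_cons]

theorem pvTermB (v row : Int) (b : Nat) (hv : 0 ≤ v) :
    (if (b : Int) < PySem.Int.floordiv v 2 then PySem.List.pyGetD pvFullRow row 0
     else if PySem.Int.mod v 2 ≠ 0 ∧ (b : Int) = PySem.Int.floordiv v 2 then
       PySem.List.pyGetD pvHalfRow row 0
     else 0) = pvCtb v row b := by
  obtain ⟨n, rfl⟩ := Int.eq_ofNat_of_zero_le hv
  have hfd : PySem.Int.floordiv (n : Int) 2 = ((n / 2 : Nat) : Int) := by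
    exact_mod_cast PySem.Int.floordiv_natCast n 2
  have hmd : PySem.Int.mod (n : Int) 2 = ((n % 2 : Nat) : Int) := by
    exact_mod_cast PySem.Int.mod_natCast n 2
  rw [hfd, hmd]
  unfold pvCtb
  simp only [Int.toNat_natCast]
  by_cases h1 : b < n / 2
  · rw [if_pos (by exact_mod_cast h1), if_pos h1]
  · rw [if_neg (by exact_mod_cast h1), if_neg h1]
    by_cases h2 : n % 2 = 1 ∧ b = n / 2
    · rw [if_pos ⟨by omega, by exact_mod_cast h2.2⟩, if_pos h2]
    · rw [if_neg (by rintro ⟨hm, hb⟩; exact h2 ⟨by omega, by exact_mod_cast hb⟩), if_neg h2]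

theorem pvS_sum (g : List Int) (r : Int) (b : Nat) :
    pvS g r b = ((PySem.List.enumerate g r).map (fun rv => pvCtb rv.2 rv.1 b)).sum := by
  induction g generalizing r with
  | nil => simp [pvS]
  | cons v t ih =>
    rw [PySem.List.enumerate_cons, List.map_cons, List.sum_cons, ← ih]
    rfl

theorem pvSumB (g : List Int) (r : Int) (b : Nat) (hg : ∀ v ∈ g, 0 ≤ v) :
    (PySem.List.enumerate g r).foldl (fun s rv =>
        s + (if (b : Int) < PySem.Int.floordiv rv.2 2 then PySem.List.pyGetD pvFullRow rv.1 0
             else if PySem.Int.mod rv.2 2 ≠ 0 ∧ (b : Int) = PySem.Int.floordiv rv.2 2 then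
               PySem.List.pyGetD pvHalfRow rv.1 0
             else 0)) 0
    = pvS g r b := by
  rw [PySem.List.foldl_add, zero_add]
  have h1 : ∀ rv ∈ PySem.List.enumerate g r,
      (if (b : Int) < PySem.Int.floordiv rv.2 2 then PySem.List.pyGetD pvFullRow rv.1 0
       else if PySem.Int.mod rv.2 2 ≠ 0 ∧ (b : Int) = PySem.Int.floordiv rv.2 2 then
         PySem.List.pyGetD pvHalfRow rv.1 0
       else 0) = pvCtb rv.2 rv.1 b := by
    intro rv hrv
    apply pvTermB
    apply hg
    obtain ⟨k, hk, rfl⟩ := (PySem.List.mem_enumerate_iff g r rv).mp hrv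
    exact List.getElem_mem hk
  rw [List.map_congr_left h1, ← pvS_sum]

theorem pvChunksFrom_nil {α : Type} (r : Nat) : pvChunksFrom r ([] : List α) = [] := by
  conv_lhs => unfold pvChunksFrom
theorem pvChunksFrom_cons {α : Type} (r : Nat) (x : α) (xs : List α) :
    pvChunksFrom r (x :: xs) = (x :: xs.take (r - 1)) :: pvChunksFrom 4 (xs.drop (r - 1)) := by
  conv_lhs => unfold pvChunksFrom
theorem pvChunksFrom_map {α β : Type} (f : α → β) (r : Nat) (l : List α) :
    (pvChunksFrom r l).map (List.map f) = pvChunksFrom r (l.map f) := by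
  fun_induction pvChunksFrom r l with
  | case1 => simp [pvChunksFrom_nil]
  | case2 r x xs ih =>
    rw [List.map_cons, ih, List.map_cons, List.map_take, List.map_drop]
    conv_rhs => rw [List.map_cons, pvChunksFrom_cons]

theorem pvGb4 {α : Type} (l : List α) (n : Nat) :
    pvGroupby (fun p => PySem.Int.floordiv p.1 4) (PySem.List.enumerate l (n : Int))
    = pvChunksFrom (4 - n % 4) (PySem.List.enumerate l (n : Int)) := by
  induction l generalizing n with
  | nil => simp [PySem.List.enumerate_nil, pvGroupby, pvChunksFrom_nil]
  | cons x xs ih =>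
    rw [PySem.List.enumerate_cons, show ((n : Int) + 1) = ((n + 1 : Nat) : Int) by push_cast; ring]
    rw [pvGroupby, ih (n + 1)]
    cases xs with
    | nil =>
      simp [PySem.List.enumerate_nil, pvChunksFrom_nil, pvChunksFrom_cons]
    | cons y ys =>
      rw [PySem.List.enumerate_cons, pvChunksFrom_cons]
      dsimp only
      have hk4 : PySem.Int.floordiv ((n : Nat) : Int) 4 = ((n / 4 : Nat) : Int) := by
        exact_mod_cast PySem.Int.floordiv_natCast n 4
      have hk5 : PySem.Int.floordiv ((n + 1 : Nat) : Int) 4 = (((n + 1) / 4 : Nat) : Int) := by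
        exact_mod_cast PySem.Int.floordiv_natCast (n + 1) 4
      by_cases hmod : n % 4 = 3
      · rw [if_neg (by rw [hk4, hk5]; intro hh; have := Nat.cast_inj.mp hh; omega)]
        rw [pvChunksFrom_cons]
        have h0 : (n + 1) % 4 = 0 := by omega
        rw [hmod, h0]
        norm_num
        rw [pvChunksFrom_cons]
      · rw [if_pos (by rw [hk4, hk5]; exact_mod_cast (by omega : n / 4 = (n + 1) / 4))]
        rw [pvChunksFrom_cons]
        have h1 : 4 - n % 4 - 1 = (4 - (n + 1) % 4 - 1) + 1 := by omega
        rw [h1, List.take_succ_cons, List.drop_succ_cons]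

theorem pvChunkA (bars : List Int) : pvChunk bars 4 = pvChunksFrom 4 bars := by
  unfold pvChunk
  rw [show (PySem.List.enumerate bars) = PySem.List.enumerate bars ((0 : Nat) : Int) by norm_num]
  rw [pvGb4, pvChunksFrom_map]
  rw [show (PySem.List.enumerate bars ((0 : Nat) : Int)).map Prod.snd = bars by
    have h := PySem.List.map_snd_enumerate bars ((0 : Nat) : Int)
    exact h]


theorem pvChunkB_aux {α : Type} (N : Nat) : ∀ (l : List α), l.length ≤ N →
    (List.range ((l.length + 3) / 4)).map (fun k => (l.drop (4 * k)).take 4) = pvChunksFrom 4 l := by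
  induction N with
  | zero =>
    intro l hl
    have h0 : l = [] := List.eq_nil_of_length_eq_zero (by omega)
    subst h0
    simp [pvChunksFrom_nil]
  | succ N ih =>
    intro l hl
    cases l with
    | nil => simp [pvChunksFrom_nil]
    | cons x xs =>
      rw [pvChunksFrom_cons]
      have h1 : ((x :: xs).length + 3) / 4 = (((xs.drop 3).length + 3) / 4) + 1 := by
        simp only [List.length_drop, List.length_cons]
        omega
      rw [h1, List.range_succ_eq_map, List.map_cons]
      have hih := ih (xs.drop 3) (by simp only [List.length_drop, List.length_cons] at hl ⊢; omega)
      congr 1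
      rw [List.map_map, ← hih]
      apply List.map_congr_left
      intro k hk
      simp only [Function.comp_apply]
      rw [List.drop_drop]
      congr 1
      rw [show 4 * Nat.succ k = (4 * k + 3) + 1 by omega, List.drop_succ_cons]
      congr 1
      omega

theorem pvChunkB {α : Type} (l : List α) :
    (PySem.List.pyRange 0 (PySem.List.len l) 4).map
      (fun s => PySem.List.slice l (some s) (some (s + 4)))
    = pvChunksFrom 4 l := by
  rw [PySem.List.len_eq]
  rw [PySem.List.pyRange_of_pos 0 (l.length : Int) (by omega : (0 : Int) < 4)]
  have hcnt : (if (0 : Int) < (l.length : Int) then (((l.length : Int) - 0 + 4 - 1) / 4).toNat else 0)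
      = (l.length + 3) / 4 := by split_ifs <;> omega
  rw [hcnt, List.map_map]
  have hsl : ∀ k ∈ List.range ((l.length + 3) / 4),
      ((fun s => PySem.List.slice l (some s) (some (s + 4))) ∘ (fun k : Nat => (0 : Int) + 4 * (k : Int))) k
      = (l.drop (4 * k)).take 4 := by
    intro k hk
    simp only [Function.comp_apply]
    rw [show (0 : Int) + 4 * (k : Int) = ((4 * k : Nat) : Int) by push_cast; ring]
    rw [show ((4 * k : Nat) : Int) + 4 = ((4 * k + 4 : Nat) : Int) by push_cast; ring]
    rw [PySem.List.slice_natCast]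
    rw [show 4 * k + 4 - 4 * k = 4 by omega]
  rw [List.map_congr_left hsl]
  exact pvChunkB_aux l.length l (le_refl _)

theorem pvLineEq (g : List Int) (hg : ∀ v ∈ g, 0 ≤ v) :
    PySem.Str.join "" (((PySem.List.enumerate g).foldl (fun line rv => pvBarStep line rv.1 rv.2) []).map
      (fun code => (Char.ofNat code.toNat).toString))
    = PySem.Str.join ""
        ((PySem.List.pyRange 0
            (PySem.List.maxD (g.map (fun v => PySem.Int.floordiv v 2 + PySem.Int.mod v 2)) (fun x => x) 0) 1).map
          (fun b =>
            (Char.ofNat (0x2800 +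
              (PySem.List.enumerate g).foldl (fun s rv =>
                s + (if b < PySem.Int.floordiv rv.2 2 then PySem.List.pyGetD pvFullRow rv.1 0
                     else if PySem.Int.mod rv.2 2 ≠ 0 ∧ b = PySem.Int.floordiv rv.2 2 then
                       PySem.List.pyGetD pvHalfRow rv.1 0
                     else 0)) 0).toNat).toString)) := by
  rw [pvLineA g hg, pvWidthB g hg, PySem.List.pyRange_zero_natCast, List.map_map, List.map_map]
  congr 1
  apply List.map_congr_left
  intro b hb
  simp only [Function.comp_apply]
  rw [pvSumB g 0 b hg]


-- ===== VERDICT (by name: the statement is the Claim_ definition above) =====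
theorem braillegraph_spec : Claim_equal_braillegraph := by
  intro bars _ hpre
  unfold Spec_braillegraph braillegraph braillegraph_alt
  rw [PySem.List.foldl_append_singleton_eq_map
    (fun group => (PySem.List.enumerate group).foldl (fun line rv => pvBarStep line rv.1 rv.2) [])]
  simp only [List.nil_append]
  rw [pvChunkA, List.map_map, ← pvChunkB bars, List.map_map]
  congr 1
  apply List.map_congr_left
  intro s hs
  simp only [Function.comp_apply]
  exact pvLineEq (PySem.List.slice bars (some s) (some (s + 4)))
    (fun v hv => hpre v (PySem.List.mem_of_mem_slice bars (some s) (some (s + 4)) hv))
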